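-- pv_equiv track=rewrite | github.com/MrCamoga/Finite-Groups | groups.py | directDepr
-- ===== SOURCE A (Python) =====
-- def directDepr(A, B):
--     G = [[0 for b in range(len(B)*len(A))] for a in range(len(A)*len(B))]
--     for y in range(len(B)):
--         for x in range(len(B)):
--             for g in range(len(A)):
--                 for k in range(len(A)):
--                     G[g+y*len(A)][k+x*len(A)] = (A[g][k]+B[y][x]*len(A))%len(G)
--     return G
-- ===== SOURCE B (Python) =====
-- def directDepr(A, B):
--     n, m = len(A), len(B)
--     N = n * m
--     if N == 0:
--         return []
--     # Precompute, once per residue t of a B-entry, the n x n block: A shifted by t*n mod N.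
--     shifted = [[[(a + t * n) % N for a in row[:n]] for row in A] for t in range(m)]
--     G = []
--     for brow in B:
--         keys = [b % m for b in brow[:m]]
--         for g in range(n):
--             out = []
--             for t in keys:
--                 out += shifted[t][g]
--             G.append(out)
--     return G
-- ===== Notes on version B (the rewrite author's own statement) =====
-- stated objective: alternative
-- what changed: Instead of filling a preallocated (nm)x(nm) table with four nested index loops computing (A[g][k]+B[y][x]*n)%nm per cell, B precomputes the m possible shifted nxn blocks ((a+t*n)%N per residue t) once and assembles each output row by concatenating precomputed block rows selected by B's entries, so the main pass does list concatenation instead of per-cell interpreted arithmetic (mod is computed O(n^2 m) times instead of (nm)^2).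
import Mathlib
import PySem

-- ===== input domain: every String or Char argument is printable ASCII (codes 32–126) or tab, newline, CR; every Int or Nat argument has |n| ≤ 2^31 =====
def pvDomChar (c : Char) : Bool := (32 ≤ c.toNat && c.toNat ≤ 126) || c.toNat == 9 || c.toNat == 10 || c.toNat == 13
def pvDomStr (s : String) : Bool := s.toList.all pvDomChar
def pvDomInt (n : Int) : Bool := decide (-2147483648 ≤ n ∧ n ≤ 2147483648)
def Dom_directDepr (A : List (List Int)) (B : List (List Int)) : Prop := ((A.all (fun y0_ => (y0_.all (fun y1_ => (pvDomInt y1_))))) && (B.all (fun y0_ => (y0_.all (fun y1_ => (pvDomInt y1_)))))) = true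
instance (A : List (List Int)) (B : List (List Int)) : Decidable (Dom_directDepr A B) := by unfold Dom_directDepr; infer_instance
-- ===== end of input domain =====

-- B replaces A's four nested block-filling index loops over a mutated preallocated table by
-- precomputing the m shifted copies of A once and assembling each output row by concatenating
-- the precomputed block rows selected by B's entries.

-- ===== PORT A =====
-- Literal port of A: preallocate a zero table, then four nested loops writing each block cell.
-- A[g][k] / B[y][x] are in range under Pre_ (rows long enough), so getD is exact there.
def directDepr (A : List (List Int)) (B : List (List Int)) : List (List Int) :=
  let G0 := (List.range (A.length * B.length)).map
      (fun _ => (List.range (B.length * A.length)).map (fun _ => (0 : Int)))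
  (List.range B.length).foldl (fun G y =>
    (List.range B.length).foldl (fun G x =>
      (List.range A.length).foldl (fun G g =>
        (List.range A.length).foldl (fun G k =>
          G.modify (g + y * A.length) (fun row => row.set (k + x * A.length)
            (PySem.Int.mod ((A.getD g []).getD k 0 + (B.getD y []).getD x 0 * (A.length : Int))
              (G.length : Int)))) G) G) G) G0

-- ===== PORT B =====
-- Literal port of Source B: 'shifted' is the memo table (row[:n] → row.take n, exact: take clamps
-- like the slice); blocks[t] indexed with t = b % m ≥ 0, so getD t.toNat is exact there.
def directDepr_alt (A : List (List Int)) (B : List (List Int)) : List (List Int) :=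
  let n := A.length
  let m := B.length
  let N := n * m
  if N = 0 then []
  else
    let shifted := (List.range m).map (fun t =>
      A.map (fun row => (row.take n).map (fun a =>
        PySem.Int.mod (a + (t : Int) * (n : Int)) ((N : Nat) : Int))))
    B.foldl (fun G brow =>
      let keys := (brow.take m).map (fun b => PySem.Int.mod b ((m : Nat) : Int))
      (List.range n).foldl (fun G g =>
        G ++ [keys.foldl (fun out t => out ++ ((shifted.getD t.toNat []).getD g [])) []]) G) []

-- ===== PRECONDITION & SPEC =====
-- Pre_ excludes exactly the inputs on which the Python A raises IndexError: when both groups are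
-- nonempty and some row of A is shorter than len(A) (or a row of B shorter than len(B)).
def Pre_directDepr (A : List (List Int)) (B : List (List Int)) : Prop :=
  A.length = 0 ∨ B.length = 0 ∨
    ((∀ row ∈ A, A.length ≤ row.length) ∧ (∀ row ∈ B, B.length ≤ row.length))
instance (A : List (List Int)) (B : List (List Int)) : Decidable (Pre_directDepr A B) := by
  unfold Pre_directDepr; infer_instance
def pvWitness_directDepr : List (List Int) × List (List Int) :=
  ([[0, 1], [1, 0]], [[0, 1], [1, 0]])
def Spec_directDepr (A : List (List Int)) (B : List (List Int)) (out : List (List Int)) : Prop := out = directDepr_alt A B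
instance (A : List (List Int)) (B : List (List Int)) (out : List (List Int)) : Decidable (Spec_directDepr A B out) := by unfold Spec_directDepr; infer_instance

-- ===== CLAIM (what is proved, stated in full; the proofs are below) =====
def Claim_equal_directDepr : Prop := ∀ (A : List (List Int)) (B : List (List Int)), Dom_directDepr A B → Pre_directDepr A B → Spec_directDepr A B (directDepr A B)

-- ===== LEMMAS AND PROOFS =====

-- the common per-cell value
def pvF (A B : List (List Int)) (r c : Nat) : Int :=
  PySem.Int.mod ((A.getD (r % A.length) []).getD (c % A.length) 0
      + (B.getD (r / A.length) []).getD (c / A.length) 0 * (A.length : Int))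
    ((A.length * B.length : Nat) : Int)

def pvUpd (G : List (List Int)) (r c : Nat) (v : Int) : List (List Int) :=
  G.modify r (fun row => row.set c v)

def pvCell (G : List (List Int)) (r c : Nat) : Int := ((G[r]?).getD [])[c]?.getD 0

def pvSh (N : Nat) (G : List (List Int)) : Prop :=
  G.length = N ∧ ∀ r, r < N → ((G[r]?).getD []).length = N

def pvBodyK (A B : List (List Int)) (y x g : Nat) (G : List (List Int)) (k : Nat) : List (List Int) :=
  pvUpd G (g + y * A.length) (k + x * A.length)
    (PySem.Int.mod ((A.getD g []).getD k 0 + (B.getD y []).getD x 0 * (A.length : Int))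
      (G.length : Int))

lemma directDepr_eq (A B : List (List Int)) :
    directDepr A B =
      (List.range B.length).foldl (fun G y =>
        (List.range B.length).foldl (fun G x =>
          (List.range A.length).foldl (fun G g =>
            (List.range A.length).foldl (pvBodyK A B y x g) G) G) G)
        ((List.range (A.length * B.length)).map
          (fun _ => (List.range (B.length * A.length)).map (fun _ => (0 : Int)))) := rfl

lemma getD_pvUpd (G : List (List Int)) (r c : Nat) (v : Int) (r' : Nat) :
    ((pvUpd G r c v)[r']?).getD [] =
      if r = r' then ((G[r']?).getD []).set c v else (G[r']?).getD [] := by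
  simp only [pvUpd, List.getElem?_modify]
  cases h : G[r']? <;> split <;> simp

lemma pvSh_pvUpd {N : Nat} {G : List (List Int)} (h : pvSh N G) (r c : Nat) (v : Int) :
    pvSh N (pvUpd G r c v) := by
  refine ⟨by simpa [pvUpd, List.length_modify] using h.1, fun r' hr' => ?_⟩
  rw [getD_pvUpd]
  split
  · simp only [List.length_set]; exact h.2 r' hr'
  · exact h.2 r' hr'

lemma pvCell_pvUpd {N : Nat} {G : List (List Int)} (h : pvSh N G) {r c : Nat}
    (hr : r < N) (hc : c < N) (v : Int) (r' c' : Nat) :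
    pvCell (pvUpd G r c v) r' c' = if r' = r ∧ c' = c then v else pvCell G r' c' := by
  unfold pvCell
  rw [getD_pvUpd]
  by_cases hrr : r = r'
  · subst hrr
    have hlen : c < ((G[r]?).getD []).length := by rw [h.2 r hr]; exact hc
    by_cases hcc : c' = c
    · subst hcc
      simp [hlen]
    · rw [if_pos rfl, List.getElem?_set, if_neg (fun h' => hcc h'.symm),
        if_neg (fun h' : r = r ∧ c' = c => hcc h'.2)]
  · rw [if_neg hrr, if_neg (fun h' : r' = r ∧ c' = c => hrr h'.1.symm)]

lemma pvLoopK (A B : List (List Int)) (y x g K : Nat) (G : List (List Int))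
    (hG : pvSh (A.length * B.length) G)
    (hy : y < B.length) (hx : x < B.length) (hg : g < A.length) (hK : K ≤ A.length) :
    pvSh (A.length * B.length) ((List.range K).foldl (pvBodyK A B y x g) G) ∧
    ∀ r c, pvCell ((List.range K).foldl (pvBodyK A B y x g) G) r c =
      if r = g + y * A.length ∧ x * A.length ≤ c ∧ c < x * A.length + K
      then pvF A B r c else pvCell G r c := by
  induction K with
  | zero =>
    refine ⟨hG, fun r c => ?_⟩
    rw [List.range_zero, List.foldl_nil, if_neg (by omega)]
  | succ K ih =>
    obtain ⟨ihSh, ihCell⟩ := ih (by omega)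
    rw [List.range_succ, List.foldl_append, List.foldl_cons, List.foldl_nil]
    set F := (List.range K).foldl (pvBodyK A B y x g) G with hF
    have hrowlt : g + y * A.length < A.length * B.length := by
      calc g + y * A.length < A.length + y * A.length := by omega
        _ = (y + 1) * A.length := by ring
        _ ≤ B.length * A.length := Nat.mul_le_mul_right _ (by omega)
        _ = A.length * B.length := Nat.mul_comm _ _
    have hcollt : K + x * A.length < A.length * B.length := by
      calc K + x * A.length < A.length + x * A.length := by omega
        _ = (x + 1) * A.length := by ring
        _ ≤ B.length * A.length := Nat.mul_le_mul_right _ (by omega)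
        _ = A.length * B.length := Nat.mul_comm _ _
    have hval : PySem.Int.mod ((A.getD g []).getD K 0 + (B.getD y []).getD x 0 * (A.length : Int))
        (F.length : Int) = pvF A B (g + y * A.length) (K + x * A.length) := by
      have h1 : (g + y * A.length) % A.length = g := by
        simp [Nat.add_mul_mod_self_right, Nat.mod_eq_of_lt hg]
      have h2 : (g + y * A.length) / A.length = y := by
        rw [Nat.add_mul_div_right _ _ (by omega)]; simp [Nat.div_eq_of_lt hg]
      have h3 : (K + x * A.length) % A.length = K := by
        simp [Nat.add_mul_mod_self_right, Nat.mod_eq_of_lt (by omega : K < A.length)]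
      have h4 : (K + x * A.length) / A.length = x := by
        rw [Nat.add_mul_div_right _ _ (by omega)]
        simp [Nat.div_eq_of_lt (by omega : K < A.length)]
      simp [pvF, h1, h2, h3, h4, ihSh.1]
    refine ⟨pvSh_pvUpd ihSh _ _ _, fun r c => ?_⟩
    rw [pvBodyK, pvCell_pvUpd ihSh hrowlt hcollt _ r c, ihCell r c, hval]
    have hsw : ∀ X : Int,
        (if r = g + y * A.length ∧ c = K + x * A.length
         then pvF A B (g + y * A.length) (K + x * A.length) else X)
        = (if r = g + y * A.length ∧ c = K + x * A.length then pvF A B r c else X) := by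
      intro X
      split_ifs with h
      · rw [h.1, h.2]
      · rfl
    rw [hsw]
    split_ifs <;> first | rfl | (exfalso; omega)

lemma pvLoopG (A B : List (List Int)) (y x Gc : Nat) (G : List (List Int))
    (hG : pvSh (A.length * B.length) G)
    (hy : y < B.length) (hx : x < B.length) (hGc : Gc ≤ A.length) :
    pvSh (A.length * B.length)
      ((List.range Gc).foldl (fun G g => (List.range A.length).foldl (pvBodyK A B y x g) G) G) ∧
    ∀ r c, pvCell
        ((List.range Gc).foldl (fun G g => (List.range A.length).foldl (pvBodyK A B y x g) G) G) r c =
      if y * A.length ≤ r ∧ r < y * A.length + Gc ∧ x * A.length ≤ c ∧ c < x * A.length + A.length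
      then pvF A B r c else pvCell G r c := by
  induction Gc with
  | zero =>
    refine ⟨hG, fun r c => ?_⟩
    rw [List.range_zero, List.foldl_nil, if_neg (by omega)]
  | succ Gc ih =>
    obtain ⟨ihSh, ihCell⟩ := ih (by omega)
    rw [List.range_succ, List.foldl_append, List.foldl_cons, List.foldl_nil]
    obtain ⟨kSh, kCell⟩ := pvLoopK A B y x Gc A.length _ ihSh hy hx (by omega) le_rfl
    refine ⟨kSh, fun r c => ?_⟩
    rw [kCell r c, ihCell r c]
    split_ifs <;> first | rfl | (exfalso; omega)

lemma pvLoopX (A B : List (List Int)) (y X : Nat) (G : List (List Int))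
    (hG : pvSh (A.length * B.length) G)
    (hy : y < B.length) (hX : X ≤ B.length) :
    pvSh (A.length * B.length)
      ((List.range X).foldl (fun G x =>
        (List.range A.length).foldl (fun G g => (List.range A.length).foldl (pvBodyK A B y x g) G) G) G) ∧
    ∀ r c, pvCell
        ((List.range X).foldl (fun G x =>
          (List.range A.length).foldl (fun G g => (List.range A.length).foldl (pvBodyK A B y x g) G) G) G) r c =
      if y * A.length ≤ r ∧ r < y * A.length + A.length ∧ c < X * A.length
      then pvF A B r c else pvCell G r c := by
  induction X with
  | zero =>
    refine ⟨hG, fun r c => ?_⟩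
    have h0 : 0 * A.length = 0 := Nat.zero_mul _
    rw [List.range_zero, List.foldl_nil, if_neg (by omega)]
  | succ X ih =>
    obtain ⟨ihSh, ihCell⟩ := ih (by omega)
    rw [List.range_succ, List.foldl_append, List.foldl_cons, List.foldl_nil]
    obtain ⟨gSh, gCell⟩ := pvLoopG A B y X A.length _ ihSh hy (by omega) le_rfl
    refine ⟨gSh, fun r c => ?_⟩
    rw [gCell r c, ihCell r c]
    have hXs : (X + 1) * A.length = X * A.length + A.length := by ring
    split_ifs <;> first | rfl | (exfalso; omega)

lemma pvLoopY (A B : List (List Int)) (Y : Nat) (G : List (List Int))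
    (hG : pvSh (A.length * B.length) G) (hY : Y ≤ B.length) :
    pvSh (A.length * B.length)
      ((List.range Y).foldl (fun G y =>
        (List.range B.length).foldl (fun G x =>
          (List.range A.length).foldl (fun G g =>
            (List.range A.length).foldl (pvBodyK A B y x g) G) G) G) G) ∧
    ∀ r c, pvCell
        ((List.range Y).foldl (fun G y =>
          (List.range B.length).foldl (fun G x =>
            (List.range A.length).foldl (fun G g =>
              (List.range A.length).foldl (pvBodyK A B y x g) G) G) G) G) r c =
      if r < Y * A.length ∧ c < B.length * A.length
      then pvF A B r c else pvCell G r c := by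
  induction Y with
  | zero =>
    refine ⟨hG, fun r c => ?_⟩
    have h0 : 0 * A.length = 0 := Nat.zero_mul _
    rw [List.range_zero, List.foldl_nil, if_neg (by omega)]
  | succ Y ih =>
    obtain ⟨ihSh, ihCell⟩ := ih (by omega)
    rw [List.range_succ, List.foldl_append, List.foldl_cons, List.foldl_nil]
    obtain ⟨xSh, xCell⟩ := pvLoopX A B Y B.length _ ihSh (by omega) le_rfl
    refine ⟨xSh, fun r c => ?_⟩
    rw [xCell r c, ihCell r c]
    have hYs : (Y + 1) * A.length = Y * A.length + A.length := by ring
    split_ifs <;> first | rfl | (exfalso; omega)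

lemma pvSh_G0 (A B : List (List Int)) :
    pvSh (A.length * B.length)
      ((List.range (A.length * B.length)).map
        (fun _ => (List.range (B.length * A.length)).map (fun _ => (0 : Int)))) := by
  refine ⟨by simp, fun r hr => ?_⟩
  simp [hr, Nat.mul_comm]

lemma pvCell_eq_getElem (G : List (List Int)) (r c : Nat)
    (hr : r < G.length) (hc : c < (G[r]).length) : pvCell G r c = G[r][c] := by
  unfold pvCell
  rw [List.getElem?_eq_getElem hr]
  simp only [Option.getD_some]
  rw [List.getElem?_eq_getElem hc]
  rfl

-- A's result, characterised as a map over flat indices (under Pre_, nondegenerate case)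
lemma directDepr_eq_map (A B : List (List Int)) :
    directDepr A B =
      (List.range (A.length * B.length)).map (fun i =>
        (List.range (A.length * B.length)).map (fun j => pvF A B i j)) := by
  rw [directDepr_eq]
  obtain ⟨hSh, hCell⟩ := pvLoopY A B B.length _ (pvSh_G0 A B) le_rfl
  set F := (List.range B.length).foldl _ _ with hF
  apply List.ext_getElem
  · simp [hSh.1]
  · intro r h1 h2
    have hrN : r < A.length * B.length := by simpa [hSh.1] using h1
    have hrow : (F[r]).length = A.length * B.length := by
      have := hSh.2 r hrN
      rwa [List.getElem?_eq_getElem h1, Option.getD_some] at this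
    apply List.ext_getElem
    · simp [hrow]
    · intro c hc1 hc2
      have hcN : c < A.length * B.length := by simpa [hrow] using hc1
      have hmc : B.length * A.length = A.length * B.length := Nat.mul_comm _ _
      rw [← pvCell_eq_getElem F r c h1 hc1, hCell r c,
        if_pos ⟨by omega, by omega⟩]
      simp

-- ========== B-side lemmas ==========

lemma list_eq_range_map {α : Type} (d : α) (l : List α) :
    l = (List.range l.length).map (fun i => l.getD i d) := by
  apply List.ext_getElem
  · simp
  · intro i h1 h2
    simp [List.getD, List.getElem?_eq_getElem (by simpa using h2)]

lemma take_eq_range_map {α : Type} (d : α) (l : List α) (n : Nat) (h : n ≤ l.length) :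
    l.take n = (List.range n).map (fun i => l.getD i d) := by
  apply List.ext_getElem
  · simp; omega
  · intro i h1 h2
    have hi : i < n := by simpa using h2
    have hil : i < l.length := by omega
    simp [List.getD, List.getElem?_eq_getElem hil]

lemma flatMap_index {α β : Type} (d : α) (l : List α) (f : α → List β) :
    l.flatMap f = (List.range l.length).flatMap (fun i => f (l.getD i d)) := by
  conv_lhs => rw [list_eq_range_map d l]
  rw [List.flatMap_map]

lemma getD_range_map {α : Type} (f : Nat → α) (m t : Nat) (d : α) (h : t < m) :
    ((List.range m).map f).getD t d = f t := by
  simp [List.getD, h]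

lemma getD_map {α β : Type} (f : α → β) (l : List α) (g : Nat) (d : α) (d' : β)
    (h : g < l.length) : (l.map f).getD g d' = f (l.getD g d) := by
  simp [List.getD, List.getElem?_map, List.getElem?_eq_getElem h]

-- flatten a flatMap of equal-length map-blocks into one flat range
lemma flatten_range_map {α : Type} (h : Nat → Nat → α) (n m : Nat) :
    (List.range m).flatMap (fun y => (List.range n).map (fun g => h y g)) =
      (List.range (n * m)).map (fun i => h (i / n) (i % n)) := by
  induction m with
  | zero => simp
  | succ m ih =>
    rw [List.range_succ, List.flatMap_append, ih]
    have : n * (m + 1) = n * m + n := by ring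
    rw [this, List.range_add, List.map_append, List.map_map]
    congr 1
    · simp only [List.flatMap_cons, List.flatMap_nil, List.append_nil]
      apply List.map_congr_left
      intro g hg
      have hgn : g < n := List.mem_range.mp hg
      have hd : (n * m + g) / n = m := by
        rw [Nat.add_comm, Nat.mul_comm n m, Nat.add_mul_div_right _ _ (by omega : 0 < n)]
        simp [Nat.div_eq_of_lt hgn]
      have hm' : (n * m + g) % n = g := by
        rw [Nat.add_comm, Nat.mul_comm n m, Nat.add_mul_mod_self_right, Nat.mod_eq_of_lt hgn]
      simp [Function.comp, hd, hm']

-- replacing a B-entry by its residue mod m does not change the cell value mod n*m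
lemma pvModKey (a b : Int) (n m : Nat) (hn : 0 < n) (hm : 0 < m) :
    PySem.Int.mod (a + PySem.Int.mod b (m : Int) * (n : Int)) ((n * m : Nat) : Int) =
      PySem.Int.mod (a + b * (n : Int)) ((n * m : Nat) : Int) := by
  have hNpos : (0 : Int) < ((n * m : Nat) : Int) := by
    have : 0 < n * m := Nat.mul_pos hn hm
    exact_mod_cast this
  have hmpos : (0 : Int) < (m : Int) := by exact_mod_cast hm
  rw [PySem.Int.mod_eq_emod_of_pos hNpos, PySem.Int.mod_eq_emod_of_pos hNpos,
    PySem.Int.mod_eq_emod_of_pos hmpos]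
  have hcast : ((n * m : Nat) : Int) = (n : Int) * (m : Int) := by push_cast; ring
  rw [hcast]
  have hb : b * (n : Int) = b % (m : Int) * (n : Int) + (n : Int) * (m : Int) * (b / (m : Int)) := by
    have h := Int.emod_add_mul_ediv b (m : Int)
    calc b * (n : Int) = (b % (m : Int) + (m : Int) * (b / (m : Int))) * (n : Int) := by rw [h]
      _ = b % (m : Int) * (n : Int) + (n : Int) * (m : Int) * (b / (m : Int)) := by ring
  rw [hb, ← add_assoc, Int.add_mul_emod_self_left]

lemma pvFlatMapCongr {α β : Type} (l : List α) (f g : α → List β)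
    (h : ∀ x ∈ l, f x = g x) : l.flatMap f = l.flatMap g := by
  induction l with
  | nil => rfl
  | cons a l ih =>
    simp only [List.flatMap_cons, h a (by simp)]
    rw [ih (fun x hx => h x (by simp [hx]))]

-- B's result, characterised as the same map over flat indices (nondegenerate case, rows long enough)
lemma directDepr_alt_eq_map (A B : List (List Int))
    (hA : ∀ row ∈ A, A.length ≤ row.length) (hB : ∀ row ∈ B, B.length ≤ row.length)
    (hn : 0 < A.length) (hm : 0 < B.length) :
    directDepr_alt A B =
      (List.range (A.length * B.length)).map (fun i =>
        (List.range (A.length * B.length)).map (fun j => pvF A B i j)) := by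
  set n := A.length with hnd
  set m := B.length with hmd
  have hNne : ¬ (n * m = 0) := by positivity
  unfold directDepr_alt
  simp only [← hnd, ← hmd, if_neg hNne,
    PySem.List.foldl_append_singleton_eq_map, PySem.List.foldl_append_eq_flatMap,
    List.nil_append]
  rw [flatMap_index ([] : List Int) B, ← hmd, flatten_range_map]
  apply List.map_congr_left
  intro i hi
  have hiN : i < n * m := List.mem_range.mp hi
  have hy : i / n < m := Nat.div_lt_of_lt_mul hiN
  have hg : i % n < n := Nat.mod_lt _ hn
  have hbmem : B.getD (i / n) [] ∈ B := by
    rw [List.getD_eq_getElem _ _ (by rw [← hmd]; exact hy)]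
    exact List.getElem_mem _
  have hbl : m ≤ (B.getD (i / n) []).length := hB _ hbmem
  have hamem : A.getD (i % n) [] ∈ A := by
    rw [List.getD_eq_getElem _ _ (by rw [← hnd]; exact hg)]
    exact List.getElem_mem _
  have hal : n ≤ (A.getD (i % n) []).length := hA _ hamem
  rw [take_eq_range_map 0 _ m hbl, List.map_map, List.flatMap_map]
  trans ((List.range m).flatMap (fun x => (List.range n).map (fun k => pvF A B i (k + x * n))))
  · apply pvFlatMapCongr
    intro x hx
    have hxm : x < m := List.mem_range.mp hx
    simp only [Function.comp]
    set b : Int := (B.getD (i / n) []).getD x 0 with hb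
    have hmpos : (0 : Int) < (m : Int) := by exact_mod_cast hm
    have htnn : 0 ≤ PySem.Int.mod b (m : Int) := by
      rw [PySem.Int.mod_eq_emod_of_pos hmpos]
      exact Int.emod_nonneg b (by omega)
    have htlt : PySem.Int.mod b (m : Int) < (m : Int) := by
      rw [PySem.Int.mod_eq_emod_of_pos hmpos]
      exact Int.emod_lt_of_pos b hmpos
    have htoNat : (PySem.Int.mod b (m : Int)).toNat < m := by omega
    have hcast : (((PySem.Int.mod b (m : Int)).toNat : Nat) : Int) = PySem.Int.mod b (m : Int) :=
      Int.toNat_of_nonneg htnn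
    rw [getD_range_map _ _ _ _ htoNat]
    simp only [hcast]
    rw [getD_map _ A (i % n) [] [] (by rw [← hnd]; exact hg),
      take_eq_range_map 0 _ n hal, List.map_map]
    apply List.map_congr_left
    intro k hk
    have hkn : k < n := List.mem_range.mp hk
    have hrow : (k + x * n) % n = k := by
      rw [Nat.add_mul_mod_self_right, Nat.mod_eq_of_lt hkn]
    have hcol : (k + x * n) / n = x := by
      rw [Nat.add_mul_div_right _ _ (by omega : 0 < n), Nat.div_eq_of_lt hkn]
      omega
    simp only [Function.comp, pvF, ← hnd, ← hmd, hrow, hcol, ← hb]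
    rw [pvModKey _ _ _ _ hn hm]
  · rw [flatten_range_map]
    apply List.map_congr_left
    intro j hj
    have h1 : j % n + (j / n) * n = j := by
      rw [Nat.mul_comm]; exact Nat.mod_add_div j n
    rw [h1]

-- ===== VERDICT (by name: the statement is the Claim_ definition above) =====
theorem directDepr_spec : Claim_equal_directDepr := by
  intro A B _ hpre
  unfold Spec_directDepr
  rw [directDepr_eq_map]
  rcases Nat.eq_zero_or_pos (A.length * B.length) with hN | hN
  · rw [hN]
    simp [directDepr_alt, hN]
  · have h2 : A.length ≠ 0 ∧ B.length ≠ 0 := Nat.mul_ne_zero_iff.mp (by omega)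
    rcases hpre with h0 | h0 | ⟨hA, hB⟩
    · exact absurd h0 h2.1
    · exact absurd h0 h2.2
    · rw [directDepr_alt_eq_map A B hA hB (by omega) (by omega)]
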